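-- pv_equiv track=rewrite | github.com/pypi-data/pypi-mirror-257 | packages/chgksuite/chgksuite-0.20.0b4-py3-none-any.whl/chgksuite/composer.py | find_min_content_index
-- ===== SOURCE A (Python) =====
-- def find_min_content_index(structure):
--     types_ = [x[0] for x in structure]
--     try:
--         min_section = types_.index("section")
--     except ValueError:
--         min_section = None
--     try:
--         min_question = types_.index("Question")
--     except ValueError:
--         min_question = None
--     if min_section is not None and min_question is not None:
--         return min(min_section, min_question)
--     elif min_section is not None:
--         return min_section
--     else:
--         return min_question
-- ===== SOURCE B (Python) =====
-- def find_min_content_index(structure):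
--     types_ = [x[0] for x in structure]
--     for i, t in enumerate(types_):
--         if t == "section" or t == "Question":
--             return i
--     return None
-- ===== Notes on version B (the rewrite author's own statement) =====
-- stated objective: simpler
-- what changed: Replaces A's two separate .index() scans plus None/min reconciliation with a single enumerate pass returning the first index whose type is 'section' or 'Question'.
import Mathlib
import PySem

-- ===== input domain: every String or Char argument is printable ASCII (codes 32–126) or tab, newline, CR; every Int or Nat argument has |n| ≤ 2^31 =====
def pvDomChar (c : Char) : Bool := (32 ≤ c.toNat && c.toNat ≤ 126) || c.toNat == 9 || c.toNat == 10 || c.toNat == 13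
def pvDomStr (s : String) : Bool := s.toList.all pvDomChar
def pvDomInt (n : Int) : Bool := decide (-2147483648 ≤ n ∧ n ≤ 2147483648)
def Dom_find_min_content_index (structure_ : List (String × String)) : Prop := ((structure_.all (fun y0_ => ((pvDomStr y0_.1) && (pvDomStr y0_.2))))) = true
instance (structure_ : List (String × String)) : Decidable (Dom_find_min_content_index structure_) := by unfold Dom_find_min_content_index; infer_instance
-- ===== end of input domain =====

-- B replaces A's two .index() scans and None/min reconciliation with one single enumerate pass (simpler); return values proved equal on all inputs.

-- ===== PORT A =====
def find_min_content_index (structure_ : List (String × String)) : Option Int :=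
  let types_ := structure_.map (fun x => x.1)
  let min_section : Option Int := (PySem.List.index? types_ "section").map (fun n => (n : Int))
  let min_question : Option Int := (PySem.List.index? types_ "Question").map (fun n => (n : Int))
  match min_section, min_question with
  | some a, some b => some (min a b)
  | some a, none => some a
  | none, mq => mq

-- ===== PORT B =====
def fmciScan : List String → Int → Option Int
  | [], _ => none
  | t :: rest, i => if t = "section" ∨ t = "Question" then some i else fmciScan rest (i + 1)

def find_min_content_index_alt (structure_ : List (String × String)) : Option Int :=
  let types_ := structure_.map (fun x => x.1)
  fmciScan types_ 0

-- ===== PRECONDITION & SPEC =====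
def Spec_find_min_content_index (structure_ : List (String × String)) (out : Option Int) : Prop := out = find_min_content_index_alt structure_
instance (structure_ : List (String × String)) (out : Option Int) : Decidable (Spec_find_min_content_index structure_ out) := by unfold Spec_find_min_content_index; infer_instance

-- ===== CLAIM (what is proved, stated in full; the proofs are below) =====
def Claim_equal_find_min_content_index : Prop := ∀ (structure_ : List (String × String)), Dom_find_min_content_index structure_ → Spec_find_min_content_index structure_ (find_min_content_index structure_)

-- ===== LEMMAS AND PROOFS =====

-- A's combination of the two index? results, as a function of the type list
def fmciA (types_ : List String) : Option Int :=
  match (PySem.List.index? types_ "section").map (fun n => (n : Int)),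
        (PySem.List.index? types_ "Question").map (fun n => (n : Int)) with
  | some a, some b => some (min a b)
  | some a, none => some a
  | none, mq => mq

theorem fmciScan_shift (l : List String) (i : Int) :
    fmciScan l i = (fmciScan l 0).map (fun n => n + i) := by
  induction l generalizing i with
  | nil => simp [fmciScan]
  | cons t rest ih =>
    by_cases h : t = "section" ∨ t = "Question"
    · simp [fmciScan, h]
    · simp [fmciScan, h]
      rw [ih (i + 1), ih 1, Option.map_map]
      congr 1
      funext n
      simp; ring

theorem fmciA_eq_scan (types_ : List String) : fmciA types_ = fmciScan types_ 0 := by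
  induction types_ with
  | nil => simp [fmciA, fmciScan, PySem.List.index?_eq_idxOf?, List.idxOf?]
  | cons t rest ih =>
    by_cases hs : t = "section"
    · subst hs
      rw [fmciA, PySem.List.index?_cons_self,
        PySem.List.index?_cons_of_ne rest (by decide : "section" ≠ "Question")]
      cases hq : PySem.List.index? rest "Question" with
      | none => simp [fmciScan]
      | some k =>
        simp [fmciScan]
        omega
    · by_cases hq : t = "Question"
      · subst hq
        rw [fmciA, PySem.List.index?_cons_self,
          PySem.List.index?_cons_of_ne rest (by decide : "Question" ≠ "section")]
        cases hsr : PySem.List.index? rest "section" with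
        | none => simp [fmciScan]
        | some k =>
          simp [fmciScan]
          omega
      · rw [fmciA, PySem.List.index?_cons_of_ne rest hs,
          PySem.List.index?_cons_of_ne rest hq]
        rw [fmciScan, if_neg (by tauto), show (0:Int)+1 = 1 by norm_num, fmciScan_shift rest 1, ← ih]
        cases hsr : PySem.List.index? rest "section" with
        | none =>
          cases hqr : PySem.List.index? rest "Question" with
          | none => unfold fmciA; rw [hsr, hqr]; simp
          | some k => unfold fmciA; rw [hsr, hqr]; simp
        | some j =>
          cases hqr : PySem.List.index? rest "Question" with
          | none => unfold fmciA; rw [hsr, hqr]; simp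
          | some k => unfold fmciA; rw [hsr, hqr]; simp

-- ===== VERDICT (by name: the statement is the Claim_ definition above) =====
theorem find_min_content_index_spec : Claim_equal_find_min_content_index := by
  intro s _
  unfold Spec_find_min_content_index find_min_content_index find_min_content_index_alt
  exact fmciA_eq_scan (s.map (fun x => x.1))
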